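-- pv_equiv track=rewrite | github.com/xmadsen/adventofcode | 2017/day3_2017.py | get_middle_values
-- ===== SOURCE A (Python) =====
-- def nth_odd(n):
--     return(n * 2 - 1)
--
-- def get_middle_values(layer=1):
--     if layer == 1:
--         return([1])
--     else:
--         output = [1, 1, 1, 1]
--         for i in range(0,layer-1):
--             output[0] += nth_odd(4*i+1)
--             output[1] += nth_odd(4*i+2)
--             output[2] += nth_odd(4*i+3)
--             output[3] += nth_odd(4*i+4)
--         return(output)
-- ===== SOURCE B (Python) =====
-- def get_middle_values(layer=1):
--     # Closed form: sum_{i=0}^{n-1} (8i + 2k - 1) = 4n(n-1) + n(2k-1), n = layer-1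
--     if layer == 1:
--         return [1]
--     n = max(layer - 1, 0)
--     return [1 + 4 * n * (n - 1) + n * (2 * k - 1) for k in (1, 2, 3, 4)]
-- ===== Notes on version B (the rewrite author's own statement) =====
-- stated objective: faster
-- what changed: Replaces the O(layer) loop summing four odd-number series with the closed-form arithmetic-series value 1 + 4n(n-1) + n(2k-1) per slot.
import Mathlib
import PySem

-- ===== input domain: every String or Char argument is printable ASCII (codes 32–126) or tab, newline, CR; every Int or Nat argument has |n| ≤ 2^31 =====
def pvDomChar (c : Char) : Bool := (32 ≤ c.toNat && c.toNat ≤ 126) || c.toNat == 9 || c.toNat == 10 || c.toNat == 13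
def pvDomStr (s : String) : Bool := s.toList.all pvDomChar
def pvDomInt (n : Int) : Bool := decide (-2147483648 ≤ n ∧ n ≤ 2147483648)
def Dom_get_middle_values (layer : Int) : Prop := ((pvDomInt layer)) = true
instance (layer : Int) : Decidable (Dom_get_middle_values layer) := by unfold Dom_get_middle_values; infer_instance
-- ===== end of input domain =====

-- B replaces A's O(layer) loop by the closed-form arithmetic-series value per slot (objective: faster).

-- ===== PORT A =====
def nth_odd (n : Int) : Int := n * 2 - 1

-- the loop body: output[0..3] += nth_odd(4*i+1..4) on the 4-tuple of accumulators
def spiralStep (o : Int × Int × Int × Int) (i : Int) : Int × Int × Int × Int :=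
  (o.1 + nth_odd (4 * i + 1), o.2.1 + nth_odd (4 * i + 2),
   o.2.2.1 + nth_odd (4 * i + 3), o.2.2.2 + nth_odd (4 * i + 4))

def get_middle_values (layer : Int) : List Int :=
  if layer = 1 then [1]
  else
    let o := (PySem.List.pyRange 0 (layer - 1) 1).foldl spiralStep (1, 1, 1, 1)
    [o.1, o.2.1, o.2.2.1, o.2.2.2]

-- ===== PORT B =====
def get_middle_values_alt (layer : Int) : List Int :=
  if layer = 1 then [1]
  else
    let n := max (layer - 1) 0
    [1, 2, 3, 4].map (fun k => 1 + 4 * n * (n - 1) + n * (2 * k - 1))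

-- ===== PRECONDITION & SPEC =====
def Spec_get_middle_values (layer : Int) (out : List Int) : Prop := out = get_middle_values_alt layer
instance (layer : Int) (out : List Int) : Decidable (Spec_get_middle_values layer out) := by unfold Spec_get_middle_values; infer_instance

-- ===== CLAIM (what is proved, stated in full; the proofs are below) =====
def Claim_equal_get_middle_values : Prop := ∀ (layer : Int), Dom_get_middle_values layer → Spec_get_middle_values layer (get_middle_values layer)

-- ===== LEMMAS AND PROOFS =====

-- closed form of the loop: after m iterations slot k holds 1 + 4m(m-1) + m(2k-1)
lemma spiralFold_closed (m : Nat) :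
    ((List.range m).map (fun k : Nat => (0 : Int) + k)).foldl spiralStep (1, 1, 1, 1) =
      (1 + 4 * (m : Int) * (m - 1) + m * 1, 1 + 4 * (m : Int) * (m - 1) + m * 3,
       1 + 4 * (m : Int) * (m - 1) + m * 5, 1 + 4 * (m : Int) * (m - 1) + m * 7) := by
  induction m with
  | zero => simp
  | succ m ih =>
      rw [List.range_succ, List.map_append, List.foldl_append, ih]
      simp only [List.map_cons, List.map_nil, List.foldl_cons, List.foldl_nil, spiralStep, nth_odd]
      push_cast
      simp only [Prod.mk.injEq]
      refine ⟨by ring, by ring, by ring, by ring⟩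

theorem get_middle_values_spec : Claim_equal_get_middle_values := by
  intro layer _
  unfold Spec_get_middle_values get_middle_values get_middle_values_alt
  by_cases h1 : layer = 1
  · simp [h1]
  · simp only [h1, if_false]
    rw [PySem.List.pyRange_one]
    have hsub : layer - 1 - 0 = layer - 1 := by ring
    rw [hsub, spiralFold_closed]
    have hmax : max (layer - 1) 0 = ((layer - 1).toNat : Int) := by omega
    rw [hmax]
    simp only [List.map_cons, List.map_nil]
    norm_num
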